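-- pv_equiv track=rewrite | github.com/StanfordCS194/spr26-Team-26 | tests/data_generator/test_mode_b_hf_retrieval.py | _collect_raw_source_previews
-- ===== SOURCE A (Python) =====
-- from typing import Any
--
-- MAX_EXAMPLES_PER_PREVIEW_DATASET = 6
--
-- def _collect_raw_source_previews(
--     records: list[Any], max_examples_per_source: int = MAX_EXAMPLES_PER_PREVIEW_DATASET
-- ) -> dict[str, list[dict[str, str]]]:
--     previews_by_source: dict[str, list[dict[str, str]]] = {}
--     for rec in records:
--         if not isinstance(rec, dict):
--             continue
--         source = str(rec.get("source", "unknown")).strip() or "unknown"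
--         content = str(rec.get("content", "")).strip()
--         item = {"content": content[:280]}
--         previews_by_source.setdefault(source, [])
--         if len(previews_by_source[source]) < max_examples_per_source:
--             previews_by_source[source].append(item)
--     return previews_by_source
-- ===== SOURCE B (Python) =====
-- MAX_EXAMPLES_PER_PREVIEW_DATASET = 6
--
-- def _collect_raw_source_previews(
--     records, max_examples_per_source=MAX_EXAMPLES_PER_PREVIEW_DATASET
-- ):
--     # Stage 1: normalize every dict record to a (source, item) pair.
--     keyed = [
--         (
--             str(rec.get("source", "unknown")).strip() or "unknown",
--             {"content": str(rec.get("content", "")).strip()[:280]},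
--         )
--         for rec in records
--         if isinstance(rec, dict)
--     ]
--     # Stage 2: sources in first-appearance order.
--     sources = list(dict.fromkeys(src for src, _ in keyed))
--     # Stage 3: per-source scan of the pairs, capped.
--     cap = max(max_examples_per_source, 0)
--     return {
--         src: [item for s, item in keyed if s == src][:cap]
--         for src in sources
--     }
-- ===== Notes on version B (the rewrite author's own statement) =====
-- stated objective: alternative
-- what changed: B uses no dict accumulator at all: it normalizes records to (source, item) pairs, computes the distinct sources in first-appearance order, and then rescans the pair list once per source collecting that source's items and capping with a clamped slice (a staged nested-scan instead of A's single streaming pass with per-record dict bookkeeping).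
import Mathlib
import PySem

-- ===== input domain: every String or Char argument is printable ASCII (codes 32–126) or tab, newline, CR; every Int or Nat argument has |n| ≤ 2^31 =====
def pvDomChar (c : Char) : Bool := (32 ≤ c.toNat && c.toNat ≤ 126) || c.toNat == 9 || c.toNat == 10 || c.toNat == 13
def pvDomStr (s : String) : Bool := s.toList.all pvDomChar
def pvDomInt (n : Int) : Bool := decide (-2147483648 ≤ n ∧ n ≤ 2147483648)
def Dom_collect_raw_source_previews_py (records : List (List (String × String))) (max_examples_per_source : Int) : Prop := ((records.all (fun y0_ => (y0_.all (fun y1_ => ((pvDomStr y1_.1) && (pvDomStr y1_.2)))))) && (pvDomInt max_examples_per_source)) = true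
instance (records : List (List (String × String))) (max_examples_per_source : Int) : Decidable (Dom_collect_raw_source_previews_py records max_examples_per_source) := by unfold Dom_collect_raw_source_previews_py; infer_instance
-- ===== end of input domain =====

-- One honest line: B drops A's streaming dict accumulator for a staged algorithm — normalize records
-- to (source, item) pairs, dedup sources in first-appearance order, then rescan the pairs once per
-- source capping with a clamped slice; same result, genuinely different traversal (alternative).

-- shared field extraction (identical in both Pythons): source / preview item of one record
def pvSrc (rec : List (String × String)) : String :=
  let s := PySem.Str.strip ((PySem.Dict.ofList rec).getD "source" "unknown")
  if s = "" then "unknown" else s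

def pvItem (rec : List (String × String)) : List (String × String) :=
  [("content", PySem.Str.slice (PySem.Str.strip ((PySem.Dict.ofList rec).getD "content" "")) none (some 280))]

-- ===== PORT A =====
def collect_raw_source_previews_py (records : List (List (String × String))) (max_examples_per_source : Int) : List (String × List (List (String × String))) :=
  (records.foldl (fun d rec =>
      let source := pvSrc rec
      let item := pvItem rec
      let d := d.setdefault source []
      if ((d.getD source []).length : Int) < max_examples_per_source then
        d.insert source (d.getD source [] ++ [item])
      else d)
    PySem.Dict.empty).items

-- ===== PORT B =====
def collect_raw_source_previews_py_alt (records : List (List (String × String))) (max_examples_per_source : Int) : List (String × List (List (String × String))) :=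
  let keyed := records.map (fun rec => (pvSrc rec, pvItem rec))
  let sources := PySem.List.dedup (keyed.map Prod.fst)
  let cap := max max_examples_per_source 0
  sources.map (fun src =>
    (src, PySem.List.slice ((keyed.filter (fun p => p.1 == src)).map Prod.snd) none (some cap)))

-- ===== PRECONDITION & SPEC =====
def Spec_collect_raw_source_previews_py (records : List (List (String × String))) (max_examples_per_source : Int) (out : List (String × List (List (String × String)))) : Prop := out = collect_raw_source_previews_py_alt records max_examples_per_source
instance (records : List (List (String × String))) (max_examples_per_source : Int) (out : List (String × List (List (String × String)))) : Decidable (Spec_collect_raw_source_previews_py records max_examples_per_source out) := by unfold Spec_collect_raw_source_previews_py; infer_instance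

-- ===== CLAIM (what is proved, stated in full; the proofs are below) =====
def Claim_equal_collect_raw_source_previews_py : Prop := ∀ (records : List (List (String × String))) (max_examples_per_source : Int), Dom_collect_raw_source_previews_py records max_examples_per_source → Spec_collect_raw_source_previews_py records max_examples_per_source (collect_raw_source_previews_py records max_examples_per_source)

-- ===== LEMMAS AND PROOFS =====

-- truncate every group of a dict to its first t items (the relation between A's loop state and the full grouping)
def pvTrunc (t : Nat) (p : String × List (List (String × String))) : String × List (List (String × String)) :=
  (p.1, p.2.take t)

def pvT (t : Nat) (d : PySem.Dict String (List (List (String × String)))) :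
    PySem.Dict String (List (List (String × String))) :=
  PySem.Dict.mk (d.items.map (pvTrunc t))

theorem get?_pvT (t : Nat) (d : PySem.Dict String (List (List (String × String)))) (k : String) :
    (pvT t d).get? k = (d.get? k).map (List.take t) := by
  obtain ⟨l⟩ := d
  induction l with
  | nil => rfl
  | cons p rest ih =>
    show (PySem.Dict.mk (pvTrunc t p :: rest.map (pvTrunc t))).get? k = _
    rw [PySem.Dict.get?_mk_cons, PySem.Dict.get?_mk_cons]
    by_cases h : p.1 = k
    · simp [pvTrunc, h]
    · simpa [pvTrunc, h] using ih

theorem contains_pvT (t : Nat) (d : PySem.Dict String (List (List (String × String)))) (k : String) :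
    (pvT t d).contains k = d.contains k := by
  rw [PySem.Dict.contains_eq_isSome_get?, PySem.Dict.contains_eq_isSome_get?, get?_pvT]
  cases d.get? k <;> rfl

theorem nodup_step (d : PySem.Dict String (List (List (String × String))))
    (hnd : d.keys.Nodup) (rec : List (String × String)) :
    (d.modify (pvSrc rec) [] (· ++ [pvItem rec])).keys.Nodup := by
  simpa using PySem.Dict.nodup_keys_foldl_modify_key [rec] pvSrc []
    (fun _ rec => (· ++ [pvItem rec])) d hnd

theorem step_eq (m : Int) (d : PySem.Dict String (List (List (String × String))))
    (hnd : d.keys.Nodup) (rec : List (String × String)) :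
    (let source := pvSrc rec
     let item := pvItem rec
     let d' := (pvT m.toNat d).setdefault source []
     if ((d'.getD source []).length : Int) < m then d'.insert source (d'.getD source [] ++ [item]) else d')
    = pvT m.toNat (d.modify (pvSrc rec) [] (· ++ [pvItem rec])) := by
  have hmod : d.modify (pvSrc rec) [] (· ++ [pvItem rec])
      = d.insert (pvSrc rec) (d.getD (pvSrc rec) [] ++ [pvItem rec]) := rfl
  simp only []
  set src := pvSrc rec with hsrc
  set it := pvItem rec with hit
  set t := m.toNat with htdef
  by_cases hc : d.contains src = true
  · -- source already present: A appends iff the truncated group is still short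
    have hc' : (pvT t d).contains src = true := by rw [contains_pvT]; exact hc
    obtain ⟨v, hv⟩ : ∃ v, d.get? src = some v := by
      rw [PySem.Dict.contains_eq_isSome_get?] at hc
      cases hvv : d.get? src with
      | none => rw [hvv] at hc; simp at hc
      | some v => exact ⟨v, rfl⟩
    have hgd : d.getD src [] = v := PySem.Dict.getD_of_get?_eq_some d [] hv
    have hgT : (pvT t d).getD src [] = v.take t := by
      rw [PySem.Dict.getD_eq_get?_getD, get?_pvT, hv]; rfl
    have hval : ∀ p ∈ d.items, p.1 = src → p.2 = v := by
      intro p hp hpk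
      have h1 : d.get? src = some p.2 := by
        have := PySem.Dict.get?_of_mem_items (d := d) (k := p.1) (v := p.2) (by simpa using hp) hnd
        rwa [hpk] at this
      rw [hv] at h1; exact (Option.some.injEq _ _ ▸ h1).symm
    rw [PySem.Dict.setdefault_of_contains _ [] hc', hmod, hgd, hgT]
    by_cases hlt : (((v.take t).length : Nat) : Int) < m
    · have hvt : v.length < t := by
        simp only [List.length_take] at hlt
        omega
      rw [if_pos hlt]
      apply PySem.Dict.ext
      show ((pvT t d).insert src (v.take t ++ [it])).items
          = ((d.insert src (v ++ [it])).items.map (pvTrunc t))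
      rw [PySem.Dict.items_insert_of_contains _ _ hc', PySem.Dict.items_insert_of_contains _ _ hc]
      show ((d.items.map (pvTrunc t)).map _) = _
      rw [List.map_map, List.map_map]
      refine List.map_congr_left (fun p hp => ?_)
      simp only [Function.comp, pvTrunc]
      by_cases hpk : p.1 = src
      · have hpv := hval p hp hpk
        simp only [hpk, hpv, beq_self_eq_true, if_true]
        have h1 : v.take t = v := List.take_of_length_le (le_of_lt hvt)
        have h2 : (v ++ [it]).take t = v ++ [it] := by
          apply List.take_of_length_le
          simp only [List.length_append, List.length_cons, List.length_nil]
          omega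
        simp [h1, h2]
      · simp [hpk]
    · rw [if_neg hlt]
      have hts : t ≤ v.length := by
        simp only [List.length_take] at hlt
        omega
      apply PySem.Dict.ext
      show (d.items.map (pvTrunc t)) = ((d.insert src (v ++ [it])).items.map (pvTrunc t))
      rw [PySem.Dict.items_insert_of_contains _ _ hc, List.map_map]
      refine List.map_congr_left (fun p hp => ?_)
      simp only [Function.comp, pvTrunc]
      by_cases hpk : p.1 = src
      · have hpv := hval p hp hpk
        simp only [hpk, hpv, beq_self_eq_true, if_true]
        have h2 : (v ++ [it]).take t = v.take t := List.take_append_of_le_length hts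
        simp [h2]
      · simp [hpk]
  · -- new source: both sides append a fresh key
    have hcf : d.contains src = false := by simpa using hc
    have hc' : (pvT t d).contains src = false := by rw [contains_pvT]; exact hcf
    have hgd : d.getD src [] = [] := PySem.Dict.getD_of_not_contains d [] hcf
    rw [PySem.Dict.setdefault_of_not_contains _ [] hc', hmod, hgd]
    rw [PySem.Dict.getD_insert_self]
    by_cases hm : ((0 : Nat) : Int) < m
    · have ht1 : 1 ≤ t := by omega
      rw [if_pos (by simpa using hm)]
      rw [PySem.Dict.insert_insert_self]
      apply PySem.Dict.ext
      show ((pvT t d).insert src ([] ++ [it])).items = ((d.insert src ([] ++ [it])).items.map (pvTrunc t))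
      rw [PySem.Dict.items_insert_of_not_contains _ _ hc', PySem.Dict.items_insert_of_not_contains _ _ hcf]
      rw [List.map_append]
      show _ = _ ++ [pvTrunc t (src, [] ++ [it])]
      have : pvTrunc t (src, [] ++ [it]) = (src, [] ++ [it]) := by
        simp only [pvTrunc]
        congr 1
        apply List.take_of_length_le
        simpa using ht1
      rw [this]
      rfl
    · have ht0 : t = 0 := by omega
      rw [if_neg (by simpa using hm)]
      apply PySem.Dict.ext
      show ((pvT t d).insert src []).items = ((d.insert src ([] ++ [it])).items.map (pvTrunc t))
      rw [PySem.Dict.items_insert_of_not_contains _ _ hc', PySem.Dict.items_insert_of_not_contains _ _ hcf]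
      rw [List.map_append]
      have : pvTrunc t (src, [] ++ [it]) = (src, []) := by simp [pvTrunc, ht0]
      show _ = _ ++ [pvTrunc t (src, [] ++ [it])]
      rw [this]
      rfl

theorem fold_eq (m : Int) (records : List (List (String × String)))
    (d : PySem.Dict String (List (List (String × String)))) (hnd : d.keys.Nodup) :
    records.foldl (fun d rec =>
      let source := pvSrc rec
      let item := pvItem rec
      let d := d.setdefault source []
      if ((d.getD source []).length : Int) < m then d.insert source (d.getD source [] ++ [item]) else d)
      (pvT m.toNat d)
    = pvT m.toNat (records.foldl (fun d rec => d.modify (pvSrc rec) [] (· ++ [pvItem rec])) d) := by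
  induction records generalizing d with
  | nil => rfl
  | cons rec rest ih =>
    rw [List.foldl_cons, List.foldl_cons]
    rw [show (let source := pvSrc rec
        let item := pvItem rec
        let d' := (pvT m.toNat d).setdefault source []
        if ((d'.getD source []).length : Int) < m then d'.insert source (d'.getD source [] ++ [item]) else d')
        = pvT m.toNat (d.modify (pvSrc rec) [] (· ++ [pvItem rec])) from step_eq m d hnd rec]
    exact ih _ (nodup_step d hnd rec)

-- ===== VERDICT (by name: the statement is the Claim_ definition above) =====
theorem collect_raw_source_previews_py_spec : Claim_equal_collect_raw_source_previews_py := by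
  intro records m _
  unfold Spec_collect_raw_source_previews_py
  unfold collect_raw_source_previews_py collect_raw_source_previews_py_alt
  simp only []
  have h0 : (PySem.Dict.empty : PySem.Dict String (List (List (String × String))))
      = pvT m.toNat PySem.Dict.empty := rfl
  rw [h0, fold_eq m records PySem.Dict.empty (by simp)]
  -- A's grouped dict, rewritten as a fold over B's (source, item) pairs
  set keyed := records.map (fun rec => (pvSrc rec, pvItem rec)) with hkeyed
  have hfold : records.foldl (fun d rec => d.modify (pvSrc rec) [] (· ++ [pvItem rec])) PySem.Dict.empty
      = keyed.foldl (fun d p => d.modify p.1 [] (· ++ [p.2])) PySem.Dict.empty := by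
    rw [hkeyed, List.foldl_map]
  rw [hfold]
  set G := keyed.foldl (fun d p => d.modify p.1 [] (· ++ [p.2])) PySem.Dict.empty with hG
  have hnd : G.keys.Nodup := by
    rw [hG]
    exact PySem.Dict.nodup_keys_foldl_modify_key keyed Prod.fst []
      (fun _ p => (· ++ [p.2])) PySem.Dict.empty (by simp)
  have hkeys : G.keys = PySem.Set.ofList (keyed.map Prod.fst) := by
    rw [hG]
    exact PySem.Dict.keys_foldl_modify_key keyed Prod.fst []
      (fun _ p => (· ++ [p.2])) PySem.Dict.empty
  have hget : ∀ c, G.getD c [] = (keyed.filter (fun p => p.1 == c)).map (·.2) := by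
    intro c
    rw [hG]
    simpa using PySem.Dict.getD_foldl_modify_append keyed PySem.Dict.empty c
  have hitems : G.items = G.keys.map (fun k => (k, G.getD k [])) :=
    PySem.Dict.items_eq_map_keys G hnd []
  show G.items.map (pvTrunc m.toNat) = _
  rw [hitems, List.map_map, hkeys]
  have hcap : (0 : Int) ≤ max m 0 := le_max_right m 0
  have hmax : (max m 0).toNat = m.toNat := by
    rcases le_total m 0 with h | h
    · rw [max_eq_right h]; omega
    · rw [max_eq_left h]
  rw [PySem.List.dedup_eq_ofList]
  refine List.map_congr_left (fun k _ => ?_)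
  simp only [Function.comp, pvTrunc, hget]
  rw [PySem.List.slice_to _ hcap, hmax]
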